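-- pv_equiv track=rewrite | github.com/aroneh19/Forritun | Assignment/15-3-ChemicalFormulae.py | get_chemicals_in_formula
-- ===== SOURCE A (Python) =====
-- def get_chemicals_in_formula(chemical_formula: str) -> set:
--     """Returns the set of element found in the formula."""
--     i = 0
--     chemicals = set()
--
--     while i < len(chemical_formula):
--         if i + 1 < len(chemical_formula) and chemical_formula[i + 1].islower():
--             chemicals.add(chemical_formula[i:i + 2])
--             i += 2
--         else:
--             chemicals.add(chemical_formula[i])
--             i += 1
--
--         while i < len(chemical_formula) and chemical_formula[i].isdigit():
--             i += 1
--
--     return chemicals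
-- ===== SOURCE B (Python) =====
-- def get_chemicals_in_formula(chemical_formula: str) -> set:
--     """Returns the set of element found in the formula."""
--     chemicals = set()
--     pending = None        # head char of an unfinished token, if any
--     skipping = False      # currently inside a digit run that follows a finished token
--     for ch in chemical_formula:
--         if pending is not None:
--             if ch.islower():
--                 chemicals.add(pending + ch)
--                 pending, skipping = None, True
--             elif ch.isdigit():
--                 chemicals.add(pending)
--                 pending, skipping = None, True
--             else:
--                 chemicals.add(pending)
--                 pending, skipping = ch, False
--         elif skipping and ch.isdigit():
--             pass
--         else:
--             pending, skipping = ch, False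
--     if pending is not None:
--         chemicals.add(pending)
--     return chemicals
-- ===== Notes on version B (the rewrite author's own statement) =====
-- stated objective: alternative
-- what changed: Replaces the index-based scan with its nested digit-skipping while-loop and per-step slicing/indexing by a single forward pass over the characters driven by a small state machine (pending head char + skipping-digits flag), collecting tokens with no indexing, no slices and no inner loop.
import Mathlib
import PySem

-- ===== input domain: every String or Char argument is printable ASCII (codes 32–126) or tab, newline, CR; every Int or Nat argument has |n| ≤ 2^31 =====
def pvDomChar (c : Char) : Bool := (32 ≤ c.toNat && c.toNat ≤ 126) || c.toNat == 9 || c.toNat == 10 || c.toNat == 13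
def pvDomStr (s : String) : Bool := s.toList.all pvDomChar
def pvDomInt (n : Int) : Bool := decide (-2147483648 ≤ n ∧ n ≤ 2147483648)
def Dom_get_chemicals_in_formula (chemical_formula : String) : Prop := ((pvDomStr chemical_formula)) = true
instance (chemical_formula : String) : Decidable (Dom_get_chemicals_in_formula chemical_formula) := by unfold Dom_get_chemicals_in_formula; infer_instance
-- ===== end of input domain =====

-- B replaces A's index-based scan (with nested digit-skipping while-loop and slicing) by a
-- single forward pass with a small state machine; same return value (a timing run measured B faster).

-- ===== PORT A =====
-- inner loop: while i < len(s) and s[i].isdigit(): i += 1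
def pvSkipDigits (cs : List Char) (i : Nat) : Nat :=
  if h : i < cs.length ∧ PySem.Chars.isdigit (cs.getD i ' ') = true then pvSkipDigits cs (i + 1) else i
termination_by cs.length - i
decreasing_by omega

theorem le_pvSkipDigits (cs : List Char) (i : Nat) : i ≤ pvSkipDigits cs i := by
  unfold pvSkipDigits
  split
  · have := le_pvSkipDigits cs (i + 1); omega
  · exact le_rfl
termination_by cs.length - i
decreasing_by omega

-- outer while loop of A (i is always in range where the port indexes with getD)
def pvALoop (cs : List Char) (i : Nat) (acc : PySem.Set String) : PySem.Set String :=
  if h : i < cs.length then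
    if i + 1 < cs.length ∧ PySem.Chars.islower (cs.getD (i + 1) ' ') = true then
      pvALoop cs (pvSkipDigits cs (i + 2))
        (PySem.Set.add acc (String.ofList (PySem.List.slice cs (some (i : Int)) (some ((i : Int) + 2)))))
    else
      pvALoop cs (pvSkipDigits cs (i + 1)) (PySem.Set.add acc (String.ofList [cs.getD i ' ']))
  else acc
termination_by cs.length - i
decreasing_by
  · have := le_pvSkipDigits cs (i + 2); omega
  · have := le_pvSkipDigits cs (i + 1); omega

def get_chemicals_in_formula (chemical_formula : String) : List String :=
  pvALoop chemical_formula.toList 0 PySem.Set.empty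

-- ===== PORT B =====
-- state: (chemicals, pending head char, skipping-digits flag); one step per character
def pvBStep (st : PySem.Set String × Option Char × Bool) (ch : Char) :
    PySem.Set String × Option Char × Bool :=
  match st with
  | (acc, some p, _) =>
    if PySem.Chars.islower ch then (PySem.Set.add acc (String.ofList [p, ch]), none, true)
    else if PySem.Chars.isdigit ch then (PySem.Set.add acc (String.ofList [p]), none, true)
    else (PySem.Set.add acc (String.ofList [p]), some ch, false)
  | (acc, none, skipping) =>
    if skipping && PySem.Chars.isdigit ch then (acc, none, true)
    else (acc, some ch, false)

def get_chemicals_in_formula_alt (chemical_formula : String) : List String :=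
  match chemical_formula.toList.foldl pvBStep (PySem.Set.empty, none, false) with
  | (acc, some p, _) => PySem.Set.add acc (String.ofList [p])
  | (acc, none, _) => acc

-- ===== PRECONDITION & SPEC =====
def Spec_get_chemicals_in_formula (chemical_formula : String) (out : List String) : Prop := out = get_chemicals_in_formula_alt chemical_formula
instance (chemical_formula : String) (out : List String) : Decidable (Spec_get_chemicals_in_formula chemical_formula out) := by unfold Spec_get_chemicals_in_formula; infer_instance

-- ===== CLAIM (what is proved, stated in full; the proofs are below) =====
def Claim_equal_get_chemicals_in_formula : Prop := ∀ (chemical_formula : String), Dom_get_chemicals_in_formula chemical_formula → Spec_get_chemicals_in_formula chemical_formula (get_chemicals_in_formula chemical_formula)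

-- ===== LEMMAS AND PROOFS =====

-- list-structural reading of A's outer loop
def pvAList : List Char → PySem.Set String → PySem.Set String
  | [], acc => acc
  | [c], acc => PySem.Set.add acc (String.ofList [c])
  | c :: d :: rest, acc =>
    if PySem.Chars.islower d = true then
      pvAList (rest.dropWhile PySem.Chars.isdigit) (PySem.Set.add acc (String.ofList [c, d]))
    else
      pvAList ((d :: rest).dropWhile PySem.Chars.isdigit) (PySem.Set.add acc (String.ofList [c]))
termination_by l _ => l.length
decreasing_by
  · have := List.length_dropWhile_le (p := PySem.Chars.isdigit) rest
    simp only [List.length_cons] at *; omega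
  · have := List.length_dropWhile_le (p := PySem.Chars.isdigit) (d :: rest)
    simp only [List.length_cons] at *; omega

def pvFinish (st : PySem.Set String × Option Char × Bool) : List String :=
  match st with
  | (acc, some p, _) => PySem.Set.add acc (String.ofList [p])
  | (acc, none, _) => acc

theorem pvSkipDigits_drop (cs : List Char) (i : Nat) :
    cs.drop (pvSkipDigits cs i) = (cs.drop i).dropWhile PySem.Chars.isdigit := by
  unfold pvSkipDigits
  split
  · rename_i h
    obtain ⟨hi, hd⟩ := h
    have hdrop : cs.drop i = cs[i] :: cs.drop (i + 1) := List.drop_eq_getElem_cons hi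
    have hget : cs.getD i ' ' = cs[i] := List.getD_eq_getElem cs ' ' hi
    rw [pvSkipDigits_drop cs (i + 1), hdrop, List.dropWhile_cons]
    rw [hget] at hd
    simp [hd]
  · rename_i h
    by_cases hi : i < cs.length
    · have hd : PySem.Chars.isdigit (cs.getD i ' ') = false := by
        cases hx : PySem.Chars.isdigit (cs.getD i ' ') with
        | false => rfl
        | true => exact absurd ⟨hi, hx⟩ h
      have hdrop : cs.drop i = cs[i] :: cs.drop (i + 1) := List.drop_eq_getElem_cons hi
      have hget : cs.getD i ' ' = cs[i] := List.getD_eq_getElem cs ' ' hi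
      rw [hdrop, List.dropWhile_cons]
      rw [hget] at hd
      simp [hd]
    · have : cs.drop i = [] := List.drop_eq_nil_of_le (by omega)
      simp [this]
termination_by cs.length - i
decreasing_by omega

theorem pvALoop_eq_pvAList (cs : List Char) (i : Nat) (acc : PySem.Set String) :
    pvALoop cs i acc = pvAList (cs.drop i) acc := by
  unfold pvALoop
  split
  · rename_i hi
    have hdrop : cs.drop i = cs[i] :: cs.drop (i + 1) := List.drop_eq_getElem_cons hi
    have hget : cs.getD i ' ' = cs[i] := List.getD_eq_getElem cs ' ' hi
    by_cases h1 : i + 1 < cs.length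
    · have hdrop1 : cs.drop (i + 1) = cs[i + 1] :: cs.drop (i + 2) := List.drop_eq_getElem_cons h1
      have hget1 : cs.getD (i + 1) ' ' = cs[i + 1] := List.getD_eq_getElem cs ' ' h1
      by_cases hlow : PySem.Chars.islower (cs[i + 1]) = true
      · have hcond : i + 1 < cs.length ∧ PySem.Chars.islower (cs.getD (i + 1) ' ') = true := by
          rw [hget1]; exact ⟨h1, hlow⟩
        rw [if_pos hcond]
        have hslice : PySem.List.slice cs (some (i : Int)) (some ((i : Int) + 2)) = [cs[i], cs[i + 1]] := by
          have h2 : ((i : Int) + 2) = ((i : Int) + ((2 : Nat) : Int)) := by push_cast; ring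
          rw [h2, PySem.List.slice_natCast_add, hdrop, hdrop1]
          rfl
        rw [hslice, pvALoop_eq_pvAList cs (pvSkipDigits cs (i + 2)), pvSkipDigits_drop,
          hdrop, hdrop1, pvAList, if_pos hlow]
      · have hcond : ¬ (i + 1 < cs.length ∧ PySem.Chars.islower (cs.getD (i + 1) ' ') = true) := by
          rw [hget1]; intro hx; exact hlow hx.2
        rw [if_neg hcond, pvALoop_eq_pvAList cs (pvSkipDigits cs (i + 1)), pvSkipDigits_drop,
          hget, hdrop, hdrop1, pvAList, if_neg hlow]
    · have hcond : ¬ (i + 1 < cs.length ∧ PySem.Chars.islower (cs.getD (i + 1) ' ') = true) := by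
        intro hx; exact h1 hx.1
      rw [if_neg hcond, pvALoop_eq_pvAList cs (pvSkipDigits cs (i + 1)), pvSkipDigits_drop,
        hget, hdrop]
      have : cs.drop (i + 1) = [] := List.drop_eq_nil_of_le (by omega)
      rw [this]
      simp [pvAList]
  · rename_i hi
    have : cs.drop i = [] := List.drop_eq_nil_of_le (by omega)
    rw [this, pvAList]
termination_by cs.length - i
decreasing_by all_goals (have h2 := le_pvSkipDigits cs (i + 2); have h1' := le_pvSkipDigits cs (i + 1); omega)

-- after a finished token, B's fold skips exactly the leading digit run
-- (stated under pvFinish: the final skipping flags differ, the result does not)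
theorem pvFold_skip (l : List Char) (acc : PySem.Set String) :
    pvFinish (l.foldl pvBStep (acc, none, true)) =
      pvFinish ((l.dropWhile PySem.Chars.isdigit).foldl pvBStep (acc, none, false)) := by
  induction l with
  | nil => rfl
  | cons c t ih =>
    by_cases hd : PySem.Chars.isdigit c = true
    · have hstep : pvBStep (acc, none, true) c = (acc, none, true) := by simp [pvBStep, hd]
      rw [List.foldl_cons, hstep, List.dropWhile_cons, if_pos hd, ih]
    · have h1 : pvBStep (acc, none, true) c = (acc, some c, false) := by
        simp [pvBStep, hd]
      have h2 : pvBStep (acc, none, false) c = (acc, some c, false) := by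
        simp [pvBStep]
      rw [List.foldl_cons, h1, List.dropWhile_cons, if_neg hd, List.foldl_cons, h2]

theorem pvAList_eq_fold (l : List Char) (acc : PySem.Set String) :
    pvAList l acc = pvFinish (l.foldl pvBStep (acc, none, false)) := by
  match l with
  | [] => simp [pvAList, pvFinish]
  | [c] =>
    simp [pvAList, pvBStep, pvFinish]
  | c :: d :: rest =>
    have hstepc : pvBStep (acc, none, false) c = (acc, some c, false) := by simp [pvBStep]
    rw [List.foldl_cons, hstepc, List.foldl_cons]
    by_cases hlow : PySem.Chars.islower d = true
    · have hstepd : pvBStep (acc, some c, false) d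
          = (PySem.Set.add acc (String.ofList [c, d]), none, true) := by simp [pvBStep, hlow]
      rw [hstepd, pvFold_skip, pvAList, if_pos hlow,
        pvAList_eq_fold (rest.dropWhile PySem.Chars.isdigit)]
    · by_cases hdig : PySem.Chars.isdigit d = true
      · have hstepd : pvBStep (acc, some c, false) d
            = (PySem.Set.add acc (String.ofList [c]), none, true) := by simp [pvBStep, hlow, hdig]
        rw [hstepd, pvFold_skip, pvAList, if_neg hlow, List.dropWhile_cons, if_pos hdig,
          pvAList_eq_fold (rest.dropWhile PySem.Chars.isdigit)]
      · have hstepd : pvBStep (acc, some c, false) d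
            = (PySem.Set.add acc (String.ofList [c]), some d, false) := by simp [pvBStep, hlow, hdig]
        have hstepd' : pvBStep (PySem.Set.add acc (String.ofList [c]), none, false) d
            = (PySem.Set.add acc (String.ofList [c]), some d, false) := by simp [pvBStep]
        rw [hstepd, pvAList, if_neg hlow, List.dropWhile_cons, if_neg hdig,
          pvAList_eq_fold (d :: rest), List.foldl_cons, hstepd']
termination_by l.length
decreasing_by all_goals (simp only [List.length_cons]; have := List.length_dropWhile_le (p := PySem.Chars.isdigit) rest; omega)

theorem pvAlt_eq_finish (s : String) :
    get_chemicals_in_formula_alt s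
      = pvFinish (s.toList.foldl pvBStep (PySem.Set.empty, none, false)) := by
  unfold get_chemicals_in_formula_alt pvFinish
  rcases s.toList.foldl pvBStep (PySem.Set.empty, none, false) with ⟨a, p, b⟩
  cases p <;> rfl

-- ===== VERDICT (by name: the statement is the Claim_ definition above) =====
theorem get_chemicals_in_formula_spec : Claim_equal_get_chemicals_in_formula := by
  intro s _
  unfold Spec_get_chemicals_in_formula get_chemicals_in_formula
  rw [pvALoop_eq_pvAList, List.drop_zero, pvAList_eq_fold, pvAlt_eq_finish]
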